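-- pv_equiv track=rewrite | github.com/pfpotgieter/Stone-Soup | stonesoup/runmanager/runmanagercore.py | get_config_and_param_lists
-- ===== SOURCE A (Python) =====
-- def get_config_and_param_lists(files):
--     """Matches the config file and parameter file by name and pairs them together
--     within a list
--
--     Parameters
--     ----------
--     files : list
--         List of file paths
--
--     Returns
--     -------
--     List
--         List of file paths pair together
--     """
--     pair = []
--     pairs = []
--
--     for file in files:
--         if not pair:
--             pair.append(file)
--         elif file.startswith(pair[0].split('.', 1)[0]):
--             pair.append(file)
--             pairs.append(pair)
--             pair = []
--         else:
--             pair = []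
--     return pairs
-- ===== SOURCE B (Python) =====
-- def get_config_and_param_lists(files):
--     it = iter(files)
--     return [[a, b] for a, b in zip(it, it)
--             if b.startswith(a.split('.', 1)[0])]
-- ===== Notes on version B (the rewrite author's own statement) =====
-- stated objective: simpler
-- what changed: Replaces A's stateful pair-buffer with its three-way branch by a direct iteration over consecutive disjoint pairs (zip of one iterator with itself) with a single startswith filter.
import Mathlib
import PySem

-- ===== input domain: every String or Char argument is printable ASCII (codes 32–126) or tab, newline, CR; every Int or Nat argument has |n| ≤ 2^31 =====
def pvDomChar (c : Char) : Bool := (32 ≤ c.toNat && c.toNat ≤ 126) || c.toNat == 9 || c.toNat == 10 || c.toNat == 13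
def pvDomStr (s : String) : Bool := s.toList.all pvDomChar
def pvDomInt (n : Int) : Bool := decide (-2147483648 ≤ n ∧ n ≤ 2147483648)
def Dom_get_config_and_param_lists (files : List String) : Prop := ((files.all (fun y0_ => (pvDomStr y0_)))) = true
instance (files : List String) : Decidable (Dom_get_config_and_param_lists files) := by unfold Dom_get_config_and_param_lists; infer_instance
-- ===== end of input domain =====

-- B replaces A's stateful pair-buffer/three-way branch with a direct walk over consecutive
-- disjoint pairs (simpler decomposition, same cost).

-- shared helper: `s.split('.', 1)[0]` (split with '.' nonempty always returns a nonempty list)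
def pvDotPrefix (s : String) : String :=
  ((PySem.Str.splitMax? s "." 1).getD []).headD ""

-- ===== PORT A =====
-- one foldl step = one iteration of A's for-loop over (pair, pairs)
def pvStepA (st : List String × List (List String)) (file : String) :
    List String × List (List String) :=
  if st.1.isEmpty then (st.1 ++ [file], st.2)
  else if PySem.Str.startswith file (pvDotPrefix (st.1.headD "")) then
    ([], st.2 ++ [st.1 ++ [file]])
  else ([], st.2)

def get_config_and_param_lists (files : List String) : List (List String) :=
  (files.foldl pvStepA ([], [])).2

-- ===== PORT B =====
-- `zip(it, it)` over the same iterator: the list of consecutive disjoint pairs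
def pvPairsOf : List String → List (String × String)
  | a :: b :: rest => (a, b) :: pvPairsOf rest
  | _ => []

def get_config_and_param_lists_alt (files : List String) : List (List String) :=
  (pvPairsOf files).filterMap
    (fun ab => if PySem.Str.startswith ab.2 (pvDotPrefix ab.1) then some [ab.1, ab.2] else none)

-- ===== PRECONDITION & SPEC =====
def Spec_get_config_and_param_lists (files : List String) (out : List (List String)) : Prop := out = get_config_and_param_lists_alt files
instance (files : List String) (out : List (List String)) : Decidable (Spec_get_config_and_param_lists files out) := by unfold Spec_get_config_and_param_lists; infer_instance

-- ===== CLAIM (what is proved, stated in full; the proofs are below) =====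
def Claim_equal_get_config_and_param_lists : Prop := ∀ (files : List String), Dom_get_config_and_param_lists files → Spec_get_config_and_param_lists files (get_config_and_param_lists files)

-- ===== LEMMAS AND PROOFS =====

-- two-step induction principle matching pvPairsOf's recursion
def pvTwoStepInd {α : Type} {motive : List α → Prop}
    (h0 : motive []) (h1 : ∀ a, motive [a])
    (h2 : ∀ a b l, motive l → motive (a :: b :: l)) : ∀ l, motive l
  | [] => h0
  | [a] => h1 a
  | a :: b :: l => h2 a b l (pvTwoStepInd h0 h1 h2 l)

theorem pv_foldA_eq (files : List String) :
    ∀ acc, (files.foldl pvStepA ([], acc)).2 = acc ++ get_config_and_param_lists_alt files := by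
  induction files using pvTwoStepInd with
  | h0 => intro acc; simp [get_config_and_param_lists_alt, pvPairsOf]
  | h1 a => intro acc; simp [get_config_and_param_lists_alt, pvPairsOf, pvStepA]
  | h2 a b l ih =>
    intro acc
    simp only [List.foldl_cons]
    rw [show pvStepA ([], acc) a = ([a], acc) from by simp [pvStepA]]
    by_cases h : PySem.Str.startswith b (pvDotPrefix a) = true
    · rw [show pvStepA ([a], acc) b = ([], acc ++ [[a, b]]) from by
        simp only [pvStepA, List.isEmpty_cons, Bool.false_eq_true, if_false, List.headD_cons, h,
          if_true, List.singleton_append]]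
      rw [ih]
      simp only [get_config_and_param_lists_alt, pvPairsOf, List.filterMap_cons, h, if_true]
      simp
    · rw [show pvStepA ([a], acc) b = ([], acc) from by
        simp only [pvStepA, List.isEmpty_cons, Bool.false_eq_true, if_false, List.headD_cons]
        rw [if_neg h]]
      rw [ih]
      simp only [get_config_and_param_lists_alt, pvPairsOf, List.filterMap_cons]
      rw [if_neg h]

-- ===== VERDICT (by name: the statement is the Claim_ definition above) =====
theorem get_config_and_param_lists_spec : Claim_equal_get_config_and_param_lists := by
  intro files _
  unfold Spec_get_config_and_param_lists get_config_and_param_lists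
  simpa using pv_foldA_eq files []
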